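-- pv_equiv track=rewrite | github.com/Kamal578/CSCI-6515-NLP-Projects | src/heaps.py | compute_heaps_points
-- ===== SOURCE A (Python) =====
-- from typing import Iterable, List, Tuple
--
-- def compute_heaps_points(tokens: Iterable[str], step: int = 1000) -> List[Tuple[int, int]]:
--     """
--     Stream tokens and record (N, V) every `step` tokens:
--       N = total tokens seen
--       V = unique types seen
--     """
--     seen = set()
--     N = 0
--     points: List[Tuple[int, int]] = []
--     next_mark = step
--
--     for tok in tokens:
--         N += 1
--         seen.add(tok)
--         if N >= next_mark:
--             points.append((N, len(seen)))
--             next_mark += step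
--
--     # ensure final point exists
--     if not points or points[-1][0] != N:
--         points.append((N, len(seen)))
--
--     return points
-- ===== SOURCE B (Python) =====
-- def compute_heaps_points(tokens, step=1000):
--     """Block-wise re-implementation: consume the tokens in chunks of `stride`,
--     updating the seen-set per chunk, one point per chunk.
--     A non-positive step records a point at every token (as the original does)."""
--     toks = list(tokens)
--     stride = step if step > 0 else 1
--     seen = set()
--     points = []
--     pos = 0
--     rest = toks
--     while rest:
--         chunk, rest = rest[:stride], rest[stride:]
--         seen.update(chunk)
--         pos += len(chunk)
--         points.append((pos, len(seen)))
--     if not points: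
--         points.append((0, 0))
--     return points
-- ===== Notes on version B (the rewrite author's own statement) =====
-- stated objective: alternative
-- what changed: Replaces A's per-token counter with a next_mark threshold and post-loop final-point patch by a block-wise loop that slices the tokens into stride-sized chunks, updates the seen-set once per chunk and emits exactly one point per chunk (plus (0,0) for empty input).
import Mathlib
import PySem

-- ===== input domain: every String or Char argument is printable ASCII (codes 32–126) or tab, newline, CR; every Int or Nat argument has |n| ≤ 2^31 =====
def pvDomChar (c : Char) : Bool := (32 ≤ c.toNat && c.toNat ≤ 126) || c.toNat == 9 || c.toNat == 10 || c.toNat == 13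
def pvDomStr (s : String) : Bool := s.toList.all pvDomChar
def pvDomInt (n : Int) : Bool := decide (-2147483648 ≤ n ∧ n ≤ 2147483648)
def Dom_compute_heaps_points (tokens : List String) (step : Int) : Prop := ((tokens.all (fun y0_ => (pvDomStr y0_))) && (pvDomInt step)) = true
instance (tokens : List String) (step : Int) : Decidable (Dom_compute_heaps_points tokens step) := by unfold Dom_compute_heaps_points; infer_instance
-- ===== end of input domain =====

-- B re-implements A's per-token counter loop block-wise (one chunk per recorded point); equivalence is proved on all inputs.

-- ===== PORT A =====
-- state: (seen, N, points, next_mark)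
def aStep (step : Int) (st : PySem.Set String × Int × List (Int × Int) × Int) (tok : String) :
    PySem.Set String × Int × List (Int × Int) × Int :=
  let N := st.2.1 + 1
  let seen := PySem.Set.add st.1 tok
  if st.2.2.2 ≤ N then (seen, N, st.2.2.1 ++ [(N, (PySem.Set.len seen : Int))], st.2.2.2 + step)
  else (seen, N, st.2.2.1, st.2.2.2)

def aLoop (step : Int) (tokens : List String) (st : PySem.Set String × Int × List (Int × Int) × Int) :
    PySem.Set String × Int × List (Int × Int) × Int :=
  tokens.foldl (aStep step) st

-- 'if not points or points[-1][0] != N: points.append((N, len(seen)))'  (points[-1] = getLast?)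
def aFinish (seen : PySem.Set String) (N : Int) (points : List (Int × Int)) : List (Int × Int) :=
  match points.getLast? with
  | none => points ++ [(N, (PySem.Set.len seen : Int))]
  | some l => if l.1 ≠ N then points ++ [(N, (PySem.Set.len seen : Int))] else points

def compute_heaps_points (tokens : List String) (step : Int) : List (Int × Int) :=
  let st := aLoop step tokens (PySem.Set.empty, 0, [], step)
  aFinish st.1 st.2.1 st.2.2.1

-- ===== PORT B =====
-- 'while rest: chunk, rest = rest[:stride], rest[stride:]; seen.update(chunk); pos += len(chunk); points.append(…)'
-- rest[:stride] = rest.take stride and (h::t)[stride:] = t.drop (stride-1) for stride ≥ 1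
-- (PySem.List.slice_to_natCast / slice_from_natCast); callers always pass stride ≥ 1.
def altGo (stride : Nat) : List String → Int → PySem.Set String → List (Int × Int) → List (Int × Int)
  | [], _, _, points => points
  | h :: t, pos, seen, points =>
      let chunk := (h :: t).take stride
      let seen' := PySem.Set.update seen chunk
      let pos' := pos + (chunk.length : Int)
      altGo stride (t.drop (stride - 1)) pos' seen' (points ++ [(pos', (PySem.Set.len seen' : Int))])
  termination_by rest => rest.length
  decreasing_by simp

def compute_heaps_points_alt (tokens : List String) (step : Int) : List (Int × Int) :=
  let stride : Nat := if 0 < step then step.toNat else 1   -- step if step > 0 else 1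
  let points := altGo stride tokens 0 PySem.Set.empty []
  if points.isEmpty then points ++ [(0, 0)] else points

-- ===== PRECONDITION & SPEC =====
def Spec_compute_heaps_points (tokens : List String) (step : Int) (out : List (Int × Int)) : Prop := out = compute_heaps_points_alt tokens step
instance (tokens : List String) (step : Int) (out : List (Int × Int)) : Decidable (Spec_compute_heaps_points tokens step out) := by unfold Spec_compute_heaps_points; infer_instance

-- ===== CLAIM (what is proved, stated in full; the proofs are below) =====
def Claim_equal_compute_heaps_points : Prop := ∀ (tokens : List String) (step : Int), Dom_compute_heaps_points tokens step → Spec_compute_heaps_points tokens step (compute_heaps_points tokens step)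

-- ===== LEMMAS AND PROOFS =====

-- A's loop invariant: points is empty only at the very start, otherwise its last entry records N
def AInv (seen : PySem.Set String) (N : Int) (pts : List (Int × Int)) : Prop :=
  (pts = [] ∧ N = 0 ∧ seen = ([] : List String)) ∨ (∃ v, pts.getLast? = some (N, v))

-- B's final fix-up
def bFinish (points : List (Int × Int)) : List (Int × Int) :=
  if points.isEmpty then points ++ [(0, 0)] else points

lemma aLoop_nil (s : Int) (st) : aLoop s [] st = st := rfl

lemma aLoop_cons (s : Int) (c : String) (cs : List String) (st) :
    aLoop s (c :: cs) st = aLoop s cs (aStep s st c) := by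
  simp [aLoop]

lemma aLoop_append (s : Int) (l1 l2 : List String) (st) :
    aLoop s (l1 ++ l2) st = aLoop s l2 (aLoop s l1 st) := by
  simp [aLoop]

lemma altGo_cons (k : Nat) (h : String) (t : List String) (pos : Int) (seen : PySem.Set String)
    (pts : List (Int × Int)) :
    altGo k (h :: t) pos seen pts
      = altGo k (t.drop (k - 1)) (pos + (((h :: t).take k).length : Int))
          (PySem.Set.update seen ((h :: t).take k))
          (pts ++ [(pos + (((h :: t).take k).length : Int),
                    (PySem.Set.len (PySem.Set.update seen ((h :: t).take k)) : Int))]) := by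
  rw [altGo]

-- a chunk strictly shorter than the gap to next_mark produces no point
lemma aLoop_no_mark (s : Int) : ∀ (cs : List String) (seen : PySem.Set String) (N : Int)
    (pts : List (Int × Int)) (nm : Int), N + (cs.length : Int) < nm →
    aLoop s cs (seen, N, pts, nm) = (PySem.Set.update seen cs, N + (cs.length : Int), pts, nm) := by
  intro cs
  induction cs with
  | nil => intro seen N pts nm h; simp [aLoop]
  | cons c cs ih =>
      intro seen N pts nm h
      rw [aLoop_cons]
      have hlt : ¬ nm ≤ N + 1 := by simp at h; omega
      simp only [aStep, hlt, if_false, PySem.Set.update_cons]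
      rw [ih _ _ _ _ (by simp at h ⊢; omega)]
      have hc : N + 1 + (cs.length : Int) = N + ((c :: cs).length : Int) := by simp; omega
      rw [hc]

-- a chunk whose length is exactly the gap produces exactly one point, at its end
lemma aLoop_mark (s : Int) : ∀ (cs : List String) (seen : PySem.Set String) (N : Int)
    (pts : List (Int × Int)) (nm : Int), cs ≠ [] → N + (cs.length : Int) = nm →
    aLoop s cs (seen, N, pts, nm)
      = (PySem.Set.update seen cs, nm,
         pts ++ [(nm, (PySem.Set.len (PySem.Set.update seen cs) : Int))], nm + s) := by
  intro cs
  induction cs with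
  | nil => intro _ _ _ _ h _; exact absurd rfl h
  | cons c cs ih =>
      intro seen N pts nm _ hlen
      rw [aLoop_cons]
      cases cs with
      | nil =>
          simp at hlen
          simp [aStep, aLoop, PySem.Set.update_cons, PySem.Set.update_nil, hlen]
      | cons c' cs' =>
          have hlt : ¬ nm ≤ N + 1 := by simp at hlen; omega
          simp only [aStep, hlt, if_false, PySem.Set.update_cons]
          rw [ih _ _ _ _ (by simp) (by simp at hlen ⊢; omega)]
          rw [PySem.Set.update_cons]

-- for non-positive step the loop marks every token, exactly as with step = 1
lemma aLoop_nonpos (s : Int) (hs : s ≤ 0) : ∀ (cs : List String) (seen : PySem.Set String)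
    (N : Int) (pts : List (Int × Int)) (nm : Int), nm ≤ N + 1 →
    ((aLoop s cs (seen, N, pts, nm)).1, (aLoop s cs (seen, N, pts, nm)).2.1,
      (aLoop s cs (seen, N, pts, nm)).2.2.1)
    = ((aLoop 1 cs (seen, N, pts, N + 1)).1, (aLoop 1 cs (seen, N, pts, N + 1)).2.1,
      (aLoop 1 cs (seen, N, pts, N + 1)).2.2.1) := by
  intro cs
  induction cs with
  | nil => intro seen N pts nm h; rfl
  | cons c cs ih =>
      intro seen N pts nm h
      rw [aLoop_cons, aLoop_cons]
      simp only [aStep, h, if_pos, le_refl]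
      have h3 := ih (PySem.Set.add seen c) (N + 1)
        (pts ++ [(N + 1, (PySem.Set.len (PySem.Set.add seen c) : Int))]) (nm + s) (by omega)
      simpa using h3

-- base case: at a chunk boundary the two final fix-ups agree
lemma finish_base (seen : PySem.Set String) (N : Int) (pts : List (Int × Int))
    (hinv : AInv seen N pts) : aFinish seen N pts = bFinish pts := by
  rcases hinv with ⟨hp, hN, hs⟩ | ⟨v, hv⟩
  · subst hp; subst hN; subst hs; rfl
  · have hne : pts ≠ [] := by rintro rfl; simp at hv
    simp [aFinish, bFinish, hv, hne]

-- when N has moved past the last recorded point, A appends the final point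
lemma finish_ne (seen seen' : PySem.Set String) (N N' : Int) (pts : List (Int × Int))
    (hinv : AInv seen N pts) (hne : N ≠ N') :
    aFinish seen' N' pts = pts ++ [(N', (PySem.Set.len seen' : Int))] := by
  rcases hinv with ⟨hp, _, _⟩ | ⟨v, hv⟩
  · subst hp; rfl
  · simp [aFinish, hv, hne]

lemma AInv_snoc (seen : PySem.Set String) (N v : Int) (pts : List (Int × Int)) :
    AInv seen N (pts ++ [(N, v)]) := Or.inr ⟨v, by simp⟩

lemma main_lemma (s : Int) (hs : 1 ≤ s) : ∀ (n : Nat) (rest : List String), rest.length ≤ n →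
    ∀ (seen : PySem.Set String) (N : Int) (pts : List (Int × Int)), AInv seen N pts →
    aFinish (aLoop s rest (seen, N, pts, N + s)).1 (aLoop s rest (seen, N, pts, N + s)).2.1
      (aLoop s rest (seen, N, pts, N + s)).2.2.1
    = bFinish (altGo s.toNat rest N seen pts) := by
  intro n
  induction n with
  | zero =>
      intro rest hr seen N pts hinv
      have : rest = [] := by simpa using hr
      subst this
      rw [aLoop_nil, altGo]
      exact finish_base seen N pts hinv
  | succ n ihn =>
      intro rest hr seen N pts hinv
      cases rest with
      | nil =>
          rw [aLoop_nil, altGo]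
          exact finish_base seen N pts hinv
      | cons h t =>
          have hks : ((s.toNat : Nat) : Int) = s := Int.toNat_of_nonneg (by omega)
          by_cases hsmall : ((h :: t).length : Int) < s
          · -- the whole rest is one final short chunk
            rw [aLoop_no_mark s (h :: t) seen N pts (N + s) (by omega)]
            have htake : (h :: t).take s.toNat = h :: t :=
              List.take_of_length_le (by omega)
            have hdrop : t.drop (s.toNat - 1) = [] :=
              List.drop_eq_nil_of_le (by simp at hsmall ⊢; omega)
            rw [altGo_cons, htake, hdrop, altGo]
            rw [finish_ne seen (PySem.Set.update seen (h :: t)) N (N + ((h :: t).length : Int))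
              pts hinv (by simp; omega)]
            simp [bFinish]
          · -- a full chunk of exactly s tokens, then recurse
            have hlenc : (((h :: t).take s.toNat).length : Int) = s := by
              simp at hsmall ⊢; omega
            have hA : aLoop s (h :: t) (seen, N, pts, N + s)
                = aLoop s ((h :: t).drop s.toNat) (aLoop s ((h :: t).take s.toNat) (seen, N, pts, N + s)) := by
              conv_lhs => rw [← List.take_append_drop s.toNat (h :: t), aLoop_append]
            rw [hA, aLoop_mark s ((h :: t).take s.toNat) seen N pts (N + s)
              (by simp; omega) (by omega)]
            rw [altGo_cons, hlenc]
            have hdrop : (h :: t).drop s.toNat = t.drop (s.toNat - 1) := by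
              conv_lhs => rw [show s.toNat = (s.toNat - 1) + 1 from by omega]
              rw [List.drop_succ_cons]
            rw [← hdrop]
            have : N + s + s = (N + s) + s := by ring
            rw [this]
            exact ihn _ (by simp at hr ⊢; omega) _ _ _ (AInv_snoc _ _ _ _)

-- ===== VERDICT (by name: the statement is the Claim_ definition above) =====
theorem compute_heaps_points_spec : Claim_equal_compute_heaps_points := by
  intro tokens step _
  unfold Spec_compute_heaps_points
  by_cases hstep : 0 < step
  · have hmain := main_lemma step (by omega) tokens.length tokens le_rfl
      (PySem.Set.empty) 0 [] (Or.inl ⟨rfl, rfl, rfl⟩)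
    have h0 : (0 : Int) + step = step := by ring
    rw [h0] at hmain
    simpa [compute_heaps_points, compute_heaps_points_alt, bFinish, hstep] using hmain
  · -- step ≤ 0: A marks every token, exactly like stride 1
    have h3 := aLoop_nonpos step (by omega) tokens (PySem.Set.empty) 0 [] step (by omega)
    simp only [Prod.mk.injEq] at h3
    have hmain := main_lemma 1 le_rfl tokens.length tokens le_rfl
      (PySem.Set.empty) 0 [] (Or.inl ⟨rfl, rfl, rfl⟩)
    have h1 : (0 : Int) + 1 = 1 := by ring
    rw [h1] at hmain
    simp only [compute_heaps_points, compute_heaps_points_alt]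
    rw [h3.1, h3.2.1, h3.2.2]
    simpa [bFinish, hstep] using hmain
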